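-- pv_equiv track=rewrite | github.com/vincentgires/vgenc | vgenc/files.py | fill_missing_images
-- ===== SOURCE A (Python) =====
-- def fill_missing_images(
--         frame_mapping: dict[int, str], start: int, end: int) -> list[str]:
--     """
--     Return a list of images for frames in range(start, end),
--     filling missing frames with the nearest available frame's filename.
--     """
--     available_frames = sorted(frame_mapping.keys())
--     filled = []
--     for i in range(start, end + 1):
--         if i in frame_mapping:
--             filled.append(frame_mapping[i])
--         else:
--             nearest = min(available_frames, key=lambda x: abs(x - i))
--             filled.append(frame_mapping[nearest])
--     return filled
-- ===== SOURCE B (Python) =====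
-- def fill_missing_images(
--         frame_mapping: dict[int, str], start: int, end: int) -> list[str]:
--     """Same result via run-length segments: each sorted key owns the frames up
--     to the midpoint with the next key (ties go to the lower key), so the output
--     is emitted one segment per key rather than one frame at a time."""
--     keys = sorted(frame_mapping)
--     filled = []
--     lo = start
--     for a, b in zip(keys, keys[1:]):
--         cut = (a + b) // 2 + 1  # first frame strictly closer to b than to a
--         if cut > lo:
--             seg_end = min(cut - 1, end)
--             if seg_end >= lo:
--                 filled += [frame_mapping[a]] * (seg_end - lo + 1)
--                 lo = seg_end + 1
--     if lo <= end:
--         filled += [frame_mapping[keys[-1]]] * (end - lo + 1)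
--     return filled
-- ===== Notes on version B (the rewrite author's own statement) =====
-- stated objective: alternative
-- what changed: Replaces the per-frame min() scan over all keys with a run-length sweep: sort the keys once, compute the midpoint cut between consecutive keys, and emit each key's whole block of frames with one list-repetition; it trades per-frame scanning for per-key segment emission.
import Mathlib
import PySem

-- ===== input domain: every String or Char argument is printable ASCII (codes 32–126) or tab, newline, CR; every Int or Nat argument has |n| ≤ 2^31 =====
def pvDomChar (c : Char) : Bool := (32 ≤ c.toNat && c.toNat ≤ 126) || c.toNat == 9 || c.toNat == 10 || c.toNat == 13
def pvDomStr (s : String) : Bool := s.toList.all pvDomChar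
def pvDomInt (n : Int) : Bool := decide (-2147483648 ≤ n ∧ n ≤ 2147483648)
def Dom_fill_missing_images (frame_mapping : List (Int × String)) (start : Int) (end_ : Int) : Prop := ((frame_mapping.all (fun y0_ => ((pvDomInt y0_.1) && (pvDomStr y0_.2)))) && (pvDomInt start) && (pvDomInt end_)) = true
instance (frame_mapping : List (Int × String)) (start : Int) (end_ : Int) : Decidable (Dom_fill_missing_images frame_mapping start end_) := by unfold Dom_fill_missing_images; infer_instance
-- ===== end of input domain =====

-- B replaces A's per-frame min() scan over all keys by a run-length sweep over the
-- sorted keys, emitting one segment per key (objective: alternative algorithm).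

-- ===== PORT A =====
def fill_missing_images (frame_mapping : List (Int × String)) (start : Int) (end_ : Int) : List String :=
  let d := PySem.Dict.ofList frame_mapping
  let available_frames := PySem.List.sorted d.keys (fun x => x) false
  (PySem.List.pyRange start (end_ + 1)).foldl (fun filled i =>
    if d.contains i then
      filled ++ [d.getD i ""]
    else
      match PySem.List.min? available_frames (fun x => (x - i).natAbs) with
      | some nearest => filled ++ [d.getD nearest ""]
      | none => filled) []   -- none = min([]) raises ValueError in Python: excluded by Pre_

-- ===== PORT B =====
def fill_missing_images_alt (frame_mapping : List (Int × String)) (start : Int) (end_ : Int) : List String :=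
  let d := PySem.Dict.ofList frame_mapping
  let keys := PySem.List.sorted d.keys (fun x => x) false
  -- for a, b in zip(keys, keys[1:]): emit the run of frames owned by key a
  let st := (keys.zip keys.tail).foldl
    (fun (st : Int × List String) (p : Int × Int) =>
      let cut := PySem.Int.floordiv (p.1 + p.2) 2 + 1
      if cut > st.1 then
        let seg_end := min (cut - 1) end_
        if seg_end ≥ st.1 then
          (seg_end + 1, st.2 ++ List.replicate (seg_end - st.1 + 1).toNat (d.getD p.1 ""))
        else st
      else st) (start, ([] : List String))
  -- trailing run: keys[-1] on keys = [] raises IndexError in Python: excluded by Pre_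
  if st.1 ≤ end_ then
    st.2 ++ List.replicate (end_ - st.1 + 1).toNat (d.getD (keys.getD (keys.length - 1) 0) "")
  else st.2

-- ===== PRECONDITION & SPEC =====
-- Pre_ excludes exactly the inputs where Python A raises (ValueError from min() on an
-- empty mapping with a nonempty frame range); B raises IndexError there too.
def Pre_fill_missing_images (frame_mapping : List (Int × String)) (start : Int) (end_ : Int) : Prop :=
  frame_mapping ≠ [] ∨ end_ < start
instance (frame_mapping : List (Int × String)) (start : Int) (end_ : Int) : Decidable (Pre_fill_missing_images frame_mapping start end_) := by unfold Pre_fill_missing_images; infer_instance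

def pvWitness_fill_missing_images : (List (Int × String)) × Int × Int := ([(1, "a"), (5, "b")], 0, 7)

def Spec_fill_missing_images (frame_mapping : List (Int × String)) (start : Int) (end_ : Int) (out : List String) : Prop := out = fill_missing_images_alt frame_mapping start end_
instance (frame_mapping : List (Int × String)) (start : Int) (end_ : Int) (out : List String) : Decidable (Spec_fill_missing_images frame_mapping start end_ out) := by unfold Spec_fill_missing_images; infer_instance

-- ===== CLAIM (what is proved, stated in full; the proofs are below) =====
def Claim_equal_fill_missing_images : Prop := ∀ (frame_mapping : List (Int × String)) (start : Int) (end_ : Int), Dom_fill_missing_images frame_mapping start end_ → Pre_fill_missing_images frame_mapping start end_ → Spec_fill_missing_images frame_mapping start end_ (fill_missing_images frame_mapping start end_)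

-- ===== LEMMAS AND PROOFS =====

-- the first index of the sorted key list at which |ks[j]-i| stops strictly decreasing
def pvP (ks : List Int) (i : Int) : Nat :=
  if h : ks ≠ [] then
    Nat.find (p := fun j => ¬(j + 1 < ks.length ∧ ((ks.getD (j + 1) 0) - i).natAbs < ((ks.getD j 0) - i).natAbs))
      ⟨ks.length - 1, by
        have hl : 0 < ks.length := List.length_pos_of_ne_nil h
        rintro ⟨h1, -⟩; omega⟩
  else 0

theorem pvP_spec (ks : List Int) (i : Int) (hne : ks ≠ []) :
    pvP ks i < ks.length ∧
    (∀ j, j < pvP ks i → j + 1 < ks.length ∧ ((ks.getD (j + 1) 0) - i).natAbs < ((ks.getD j 0) - i).natAbs) ∧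
    ¬(pvP ks i + 1 < ks.length ∧ ((ks.getD (pvP ks i + 1) 0) - i).natAbs < ((ks.getD (pvP ks i) 0) - i).natAbs) := by
  have hl : 0 < ks.length := List.length_pos_of_ne_nil hne
  have hex : ∃ j, ¬(j + 1 < ks.length ∧ ((ks.getD (j + 1) 0) - i).natAbs < ((ks.getD j 0) - i).natAbs) :=
    ⟨ks.length - 1, by rintro ⟨h1, -⟩; omega⟩
  have hP : pvP ks i = Nat.find hex := by unfold pvP; rw [dif_pos hne]
  rw [hP]
  refine ⟨?_, ?_, Nat.find_spec hex⟩
  · have h1 := Nat.find_min' hex (m := ks.length - 1) (by rintro ⟨h1, -⟩; omega)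
    omega
  · intro j hj
    exact not_not.mp (Nat.find_min hex hj)

theorem pv_mono_getD (ks : List Int) (hs : ks.Pairwise (· < ·)) :
    ∀ a b : Nat, a < b → b < ks.length → ks.getD a 0 < ks.getD b 0 := by
  intro a b hab hb
  have ha : a < ks.length := lt_trans hab hb
  rw [List.getD_eq_getElem ks 0 ha, List.getD_eq_getElem ks 0 hb]
  exact List.pairwise_iff_getElem.mp hs a b ha hb hab

-- weak decrease up to pvP
theorem pvP_le (ks : List Int) (i : Int) (hne : ks ≠ []) :
    ∀ n j, j + n = pvP ks i →
      ((ks.getD (pvP ks i) 0) - i).natAbs ≤ ((ks.getD j 0) - i).natAbs := by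
  intro n
  induction n with
  | zero => intro j hj; simp [← hj]
  | succ n ih =>
    intro j hj
    have hlt : j < pvP ks i := by omega
    have hstep := (pvP_spec ks i hne).2.1 j hlt
    have := ih (j + 1) (by omega)
    omega

theorem pvP_lt_before (ks : List Int) (i : Int) (hne : ks ≠ []) :
    ∀ j, j < pvP ks i →
      ((ks.getD (pvP ks i) 0) - i).natAbs < ((ks.getD j 0) - i).natAbs := by
  intro j hj
  have hstep := (pvP_spec ks i hne).2.1 j hj
  have := pvP_le ks i hne (pvP ks i - (j + 1)) (j + 1) (by omega)
  omega

theorem pvP_le_after (ks : List Int) (i : Int) (hne : ks ≠ []) (hs : ks.Pairwise (· < ·)) :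
    ∀ j, pvP ks i < j → j < ks.length →
      ((ks.getD (pvP ks i) 0) - i).natAbs ≤ ((ks.getD j 0) - i).natAbs := by
  intro j hpj hj
  have hstop := (pvP_spec ks i hne).2.2
  have hp1 : pvP ks i + 1 < ks.length := by omega
  have hnotlt : ¬(((ks.getD (pvP ks i + 1) 0) - i).natAbs < ((ks.getD (pvP ks i) 0) - i).natAbs) := by
    intro hc; exact hstop ⟨hp1, hc⟩
  have hab : ks.getD (pvP ks i) 0 < ks.getD (pvP ks i + 1) 0 := pv_mono_getD ks hs _ _ (by omega) hp1
  have hbc : ks.getD (pvP ks i + 1) 0 ≤ ks.getD j 0 := by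
    have hcase : pvP ks i + 1 = j ∨ pvP ks i + 1 < j := by omega
    rcases hcase with h | h
    · rw [h]
    · exact le_of_lt (pv_mono_getD ks hs _ _ h hj)
  omega

-- Python min with key keeps the FIRST extremal element
theorem pv_foldl_min_const {α κ : Type} [LinearOrder κ] (key : α → κ) (m : α) :
    ∀ l : List α, (∀ x ∈ l, key m ≤ key x) →
      l.foldl (fun acc x =>
        match acc with
        | none => some x
        | some m => if key x < key m then some x else some m) (some m) = some m := by
  intro l
  induction l with
  | nil => intro _; rfl
  | cons x t ih =>
    intro h
    have hx : key m ≤ key x := h x (List.mem_cons_self ..)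
    simp only [List.foldl_cons]
    rw [if_neg (not_lt.mpr hx)]
    exact ih (fun y hy => h y (List.mem_cons_of_mem _ hy))

theorem pv_min?_first {α κ : Type} [LinearOrder κ] (l1 l2 : List α) (m : α) (key : α → κ)
    (h1 : ∀ x ∈ l1, key m < key x) (h2 : ∀ x ∈ l2, key m ≤ key x) :
    PySem.List.min? (l1 ++ m :: l2) key = some m := by
  rcases h : PySem.List.min? l1 key with _ | m1
  · have hnil : l1 = [] := (PySem.List.min?_eq_none_iff _ _).mp h
    subst hnil
    unfold PySem.List.min?
    simp only [List.nil_append, List.foldl_cons]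
    exact pv_foldl_min_const key m l2 h2
  · have hm1 : m1 ∈ l1 := PySem.List.min?_mem h
    unfold PySem.List.min? at h ⊢
    rw [List.foldl_append, h]
    simp only [List.foldl_cons]
    rw [if_pos (h1 m1 hm1)]
    exact pv_foldl_min_const key m l2 h2

theorem pvP_min? (ks : List Int) (i : Int) (hne : ks ≠ []) (hs : ks.Pairwise (· < ·)) :
    PySem.List.min? ks (fun x => (x - i).natAbs) = some (ks.getD (pvP ks i) 0) := by
  have hp : pvP ks i < ks.length := (pvP_spec ks i hne).1
  have hdecomp : ks = ks.take (pvP ks i) ++ ks.getD (pvP ks i) 0 :: ks.drop (pvP ks i + 1) := by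
    rw [List.getD_eq_getElem ks 0 hp]
    rw [← List.drop_eq_getElem_cons hp, List.take_append_drop]
  conv_lhs => rw [hdecomp]
  apply pv_min?_first
  · intro x hx
    obtain ⟨j, hj, rfl⟩ := List.mem_iff_getElem.mp hx
    have hjp : j < pvP ks i := by
      have := hj; simp [List.length_take] at this; omega
    have := pvP_lt_before ks i hne j hjp
    rw [List.getElem_take, ← List.getD_eq_getElem ks 0]
    exact this
  · intro x hx
    obtain ⟨j, hj, rfl⟩ := List.mem_iff_getElem.mp hx
    have hjl : pvP ks i + 1 + j < ks.length := by
      have := hj; simp [List.length_drop] at this; omega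
    have := pvP_le_after ks i hne hs (pvP ks i + 1 + j) (by omega) hjl
    rw [List.getElem_drop, ← List.getD_eq_getElem ks 0 hjl]
    exact this

theorem pvP_of_mem (ks : List Int) (i : Int) (hne : ks ≠ []) (hs : ks.Pairwise (· < ·))
    (hmem : i ∈ ks) : ks.getD (pvP ks i) 0 = i := by
  obtain ⟨q, hq, hkq⟩ := List.mem_iff_getElem.mp hmem
  have hq0 : ((ks.getD q 0) - i).natAbs = 0 := by
    rw [List.getD_eq_getElem ks 0 hq, hkq]; simp
  rcases lt_trichotomy q (pvP ks i) with h | h | h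
  · have := pvP_lt_before ks i hne q h; omega
  · rw [← h, List.getD_eq_getElem ks 0 hq, hkq]
  · have := pvP_le_after ks i hne hs q h hq; omega

-- the common per-frame value
def pvVal (d : PySem.Dict Int String) (ks : List Int) (i : Int) : String :=
  d.getD (ks.getD (pvP ks i) 0) ""

theorem pv_range_nil (a b : Int) (h : b ≤ a) : PySem.List.pyRange a b = [] := by
  rw [PySem.List.pyRange_one]
  have : (b - a).toNat = 0 := by omega
  rw [this]
  rfl

theorem pv_foldA (d : PySem.Dict Int String) (ks : List Int)
    (hks : ks = PySem.List.sorted d.keys (fun x => x) false)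
    (hne : ks ≠ []) (hs : ks.Pairwise (· < ·)) (e : Int) :
    ∀ n : Nat, ∀ (a : Int) (acc : List String), (e - a).toNat = n →
      (PySem.List.pyRange a e).foldl (fun filled i =>
        if d.contains i then
          filled ++ [d.getD i ""]
        else
          match PySem.List.min? ks (fun x => (x - i).natAbs) with
          | some nearest => filled ++ [d.getD nearest ""]
          | none => filled) acc
      = acc ++ (PySem.List.pyRange a e).map (pvVal d ks) := by
  intro n
  induction n with
  | zero =>
    intro a acc h
    rw [pv_range_nil a e (by omega)]
    simp
  | succ n ih =>
    intro a acc h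
    rw [PySem.List.pyRange_one_cons (by omega)]
    simp only [List.foldl_cons, List.map_cons]
    have hval : (if d.contains a then acc ++ [d.getD a ""]
        else
          match PySem.List.min? ks (fun x => (x - a).natAbs) with
          | some nearest => acc ++ [d.getD nearest ""]
          | none => acc) = acc ++ [pvVal d ks a] := by
      by_cases hc : d.contains a
      · rw [if_pos hc]
        have hmem : a ∈ ks := by
          rw [hks, PySem.List.mem_sorted]
          exact (PySem.Dict.contains_iff_mem_keys d a).mp hc
        unfold pvVal
        rw [pvP_of_mem ks a hne hs hmem]
      · rw [if_neg hc, pvP_min? ks a hne hs]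
        rfl
    rw [hval, ih (a + 1) (acc ++ [pvVal d ks a]) (by omega)]
    simp

-- pvP is the unique index that is reached by strict decreases and stops there
theorem pvP_eq_of (ks : List Int) (i : Int) (hne : ks ≠ []) (q : Nat)
    (hstop : ¬(q + 1 < ks.length ∧ ((ks.getD (q + 1) 0) - i).natAbs < ((ks.getD q 0) - i).natAbs))
    (hdec : ∀ j, j < q → j + 1 < ks.length ∧ ((ks.getD (j + 1) 0) - i).natAbs < ((ks.getD j 0) - i).natAbs) :
    pvP ks i = q := by
  have hspec := pvP_spec ks i hne
  apply Nat.le_antisymm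
  · by_contra hlt
    exact hstop (hspec.2.1 q (by omega))
  · by_contra hlt
    exact hspec.2.2 (hdec (pvP ks i) (by omega))

-- the nearest available key, computed down the sorted key list by midpoint cuts
def pvNearest (s : List Int) (i : Int) : Int :=
  match s with
  | [] => 0
  | [k] => k
  | a :: b :: r =>
      if i < PySem.Int.floordiv (a + b) 2 + 1 then a else pvNearest (b :: r) i

theorem pvNearest_one (k i : Int) : pvNearest [k] i = k := rfl
theorem pvNearest_cons2 (a b : Int) (r : List Int) (i : Int) :
    pvNearest (a :: b :: r) i = if i < PySem.Int.floordiv (a + b) 2 + 1 then a else pvNearest (b :: r) i := rfl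

theorem pv_cut_iff (a b i : Int) (h : a < b) :
    ((b - i).natAbs < (a - i).natAbs ↔ PySem.Int.floordiv (a + b) 2 + 1 ≤ i) := by
  have hfd : PySem.Int.floordiv (a + b) 2 = (a + b) / 2 := by
    unfold PySem.Int.floordiv
    rw [Int.fdiv_eq_ediv]
    simp
  rw [hfd]
  omega

theorem pvNearest_eq (ks : List Int) (i : Int) :
    ks.Pairwise (· < ·) → ks ≠ [] → ks.getD (pvP ks i) 0 = pvNearest ks i := by
  induction ks with
  | nil => intro _ h; exact absurd rfl h
  | cons a t ih =>
    intro hs _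
    rcases t with _ | ⟨b, r⟩
    · have h0 : pvP [a] i = 0 := pvP_eq_of [a] i (by simp) 0 (by simp) (by omega)
      rw [h0]
      rfl
    · have hab : a < b := (List.pairwise_cons.mp hs).1 b (List.mem_cons_self ..)
      have hst : (b :: r).Pairwise (· < ·) := (List.pairwise_cons.mp hs).2
      by_cases hcut : i < PySem.Int.floordiv (a + b) 2 + 1
      · have hnotdec : ¬((b - i).natAbs < (a - i).natAbs) := by
          rw [pv_cut_iff a b i hab]; omega
        have h0 : pvP (a :: b :: r) i = 0 := by
          apply pvP_eq_of (a :: b :: r) i (by simp) 0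
          · rintro ⟨-, hd⟩; exact hnotdec hd
          · omega
        rw [h0, pvNearest_cons2, if_pos hcut]
        rfl
      · have hdec0 : (b - i).natAbs < (a - i).natAbs := by
          rw [pv_cut_iff a b i hab]; omega
        have hspec := pvP_spec (b :: r) i (by simp)
        have hshift : pvP (a :: b :: r) i = pvP (b :: r) i + 1 := by
          apply pvP_eq_of (a :: b :: r) i (by simp) (pvP (b :: r) i + 1)
          · intro hc
            apply hspec.2.2
            refine ⟨by simpa using hc.1, ?_⟩
            simpa [List.getD_cons_succ] using hc.2
          · intro j hj
            have hplt : pvP (b :: r) i < (b :: r).length := hspec.1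
            simp only [List.length_cons] at hplt
            rcases j with _ | j'
            · refine ⟨by simp only [List.length_cons]; omega, by simpa using hdec0⟩
            · have := hspec.2.1 j' (by omega)
              refine ⟨by simp only [List.length_cons]; omega, by simpa [List.getD_cons_succ] using this.2⟩
        rw [hshift, pvNearest_cons2, if_neg hcut]
        simpa [List.getD_cons_succ] using ih hst (by simp)

-- a map of a pointwise-constant function over a frame range is a replicate
theorem pv_map_const (g : Int → String) (c : String) :
    ∀ n : Nat, ∀ a b : Int, (b - a).toNat = n → (∀ i : Int, a ≤ i → i < b → g i = c) →
      (PySem.List.pyRange a b).map g = List.replicate (b - a).toNat c := by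
  intro n
  induction n with
  | zero =>
    intro a b h _
    rw [pv_range_nil a b (by omega), h]
    rfl
  | succ n ih =>
    intro a b h hc
    rw [PySem.List.pyRange_one_cons (by omega), h, List.replicate_succ]
    simp only [List.map_cons]
    rw [hc a le_rfl (by omega)]
    have hih := ih (a + 1) b (by omega) (fun i hi hib => hc i (by omega) hib)
    have hn2 : (b - (a + 1)).toNat = n := by omega
    rw [hih, hn2]

-- the run-length fold of B produces exactly the per-frame map of nearest values
-- B's loop body and trailing run, named so the proof can rewrite with them
def pvStep (d : PySem.Dict Int String) (e : Int) : Int × List String → Int × Int → Int × List String :=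
  fun st p =>
    let cut := PySem.Int.floordiv (p.1 + p.2) 2 + 1
    if cut > st.1 then
      let seg_end := min (cut - 1) e
      if seg_end ≥ st.1 then
        (seg_end + 1, st.2 ++ List.replicate (seg_end - st.1 + 1).toNat (d.getD p.1 ""))
      else st
    else st

def pvFinish (d : PySem.Dict Int String) (ks : List Int) (e : Int) (st : Int × List String) : List String :=
  if st.1 ≤ e then st.2 ++ List.replicate (e - st.1 + 1).toNat (d.getD (ks.getD (ks.length - 1) 0) "") else st.2

-- past the end of the range nothing is appended
theorem pv_foldB_empty (d : PySem.Dict Int String) (e : Int) :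
    ∀ (l : List (Int × Int)) (lo : Int) (filled : List String), e < lo →
      l.foldl (pvStep d e) (lo, filled) = (lo, filled) := by
  intro l
  induction l with
  | nil => intro lo filled _; rfl
  | cons p t ih =>
    intro lo filled hlt
    simp only [List.foldl_cons]
    have hstep : pvStep d e (lo, filled) p = (lo, filled) := by
      simp only [pvStep]
      by_cases hcut : PySem.Int.floordiv (p.1 + p.2) 2 + 1 > lo
      · rw [if_pos hcut, if_neg (by omega)]
      · rw [if_neg hcut]
    rw [hstep]
    exact ih lo filled hlt

theorem pv_foldB (d : PySem.Dict Int String) (ks : List Int) (e : Int) :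
    ∀ (s : List Int) (lo : Int) (filled : List String),
      s ≠ [] →
      s.Pairwise (· < ·) →
      s.getD (s.length - 1) 0 = ks.getD (ks.length - 1) 0 →
      (∀ i : Int, lo ≤ i → i ≤ e → pvVal d ks i = d.getD (pvNearest s i) "") →
      pvFinish d ks e ((s.zip s.tail).foldl (pvStep d e) (lo, filled))
      = filled ++ (PySem.List.pyRange lo (e + 1)).map (pvVal d ks) := by
  intro s
  induction s with
  | nil => intro lo filled h; exact absurd rfl h
  | cons a t ih =>
    intro lo filled _ hs hlast hval
    rcases t with _ | ⟨b, r⟩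
    · -- single key: zip is empty, only the trailing run remains
      simp only [List.tail_cons, List.zip_nil_right, List.foldl_nil, pvFinish]
      by_cases hlo : lo ≤ e
      · rw [if_pos hlo]
        have hmap : (PySem.List.pyRange lo (e + 1)).map (pvVal d ks)
            = List.replicate (e + 1 - lo).toNat (d.getD (ks.getD (ks.length - 1) 0) "") := by
          apply pv_map_const _ _ (e + 1 - lo).toNat lo (e + 1) rfl
          intro i hi hib
          rw [hval i hi (by omega), pvNearest_one, ← hlast]
          rfl
        rw [hmap]
        have hn2 : (e + 1 - lo).toNat = (e - lo + 1).toNat := by omega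
        rw [hn2]
      · rw [if_neg hlo, pv_range_nil lo (e + 1) (by omega)]
        simp
    · have hab : a < b := (List.pairwise_cons.mp hs).1 b (List.mem_cons_self ..)
      have hst : (b :: r).Pairwise (· < ·) := (List.pairwise_cons.mp hs).2
      have hlast' : (b :: r).getD ((b :: r).length - 1) 0 = ks.getD (ks.length - 1) 0 := by
        simpa [List.getD_cons_succ] using hlast
      simp only [List.tail_cons, List.zip_cons_cons, List.foldl_cons]
      by_cases hcut : PySem.Int.floordiv (a + b) 2 + 1 > lo
      · by_cases hseg : min (PySem.Int.floordiv (a + b) 2 + 1 - 1) e ≥ lo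
        · have hstep : pvStep d e (lo, filled) (a, b)
              = (min (PySem.Int.floordiv (a + b) 2 + 1 - 1) e + 1,
                 filled ++ List.replicate (min (PySem.Int.floordiv (a + b) 2 + 1 - 1) e - lo + 1).toNat (d.getD a "")) := by
            simp only [pvStep]
            rw [if_pos hcut, if_pos hseg]
          rw [hstep]
          have hIH := ih (min (PySem.Int.floordiv (a + b) 2 + 1 - 1) e + 1)
            (filled ++ List.replicate (min (PySem.Int.floordiv (a + b) 2 + 1 - 1) e - lo + 1).toNat (d.getD a ""))
            (by simp) hst hlast'
            (by
              intro i hi hie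
              rw [hval i (by omega) hie, pvNearest_cons2]
              rw [if_neg (by omega)])
          simp only [List.tail_cons] at hIH
          rw [hIH]
          have hsplit : PySem.List.pyRange lo (e + 1)
              = PySem.List.pyRange lo (min (PySem.Int.floordiv (a + b) 2 + 1 - 1) e + 1)
                ++ PySem.List.pyRange (min (PySem.Int.floordiv (a + b) 2 + 1 - 1) e + 1) (e + 1) :=
            PySem.List.pyRange_one_append lo _ (e + 1) (by omega) (by omega)
          rw [hsplit, List.map_append]
          have hrepl : (PySem.List.pyRange lo (min (PySem.Int.floordiv (a + b) 2 + 1 - 1) e + 1)).map (pvVal d ks)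
              = List.replicate (min (PySem.Int.floordiv (a + b) 2 + 1 - 1) e + 1 - lo).toNat (d.getD a "") := by
            apply pv_map_const _ _ _ lo _ rfl
            intro i hi hib
            rw [hval i hi (by omega), pvNearest_cons2]
            rw [if_pos (by omega)]
          rw [hrepl]
          have hn : (min (PySem.Int.floordiv (a + b) 2 + 1 - 1) e + 1 - lo).toNat
              = (min (PySem.Int.floordiv (a + b) 2 + 1 - 1) e - lo + 1).toNat := by omega
          rw [hn, List.append_assoc]
        · -- cut > lo but the segment ends before lo: everything is past e
          have hstep : pvStep d e (lo, filled) (a, b) = (lo, filled) := by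
            simp only [pvStep]
            rw [if_pos hcut, if_neg hseg]
          rw [hstep]
          have hIH := ih lo filled (by simp) hst hlast'
            (by intro i hi hie; omega)
          simp only [List.tail_cons] at hIH
          rw [hIH]
      · -- cut already passed: key a owns no frame at or after lo
        have hstep : pvStep d e (lo, filled) (a, b) = (lo, filled) := by
          simp only [pvStep]
          rw [if_neg hcut]
        rw [hstep]
        have hIH := ih lo filled (by simp) hst hlast'
          (by
            intro i hi hie
            rw [hval i hi hie, pvNearest_cons2]
            rw [if_neg (by omega)])
        simp only [List.tail_cons] at hIH
        rw [hIH]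

theorem pv_sorted_keys_lt (d : PySem.Dict Int String) (hnd : d.keys.Nodup) :
    (PySem.List.sorted d.keys (fun x => x) false).Pairwise (· < ·) := by
  have hle := PySem.List.sorted_pairwise d.keys (fun x => x)
  have hnodup : (PySem.List.sorted d.keys (fun x => x) false).Nodup :=
    (PySem.List.sorted_perm d.keys (fun x => x) false).nodup_iff.mpr hnd
  have := hle.and hnodup
  exact this.imp (fun {a b} hab => lt_of_le_of_ne hab.1 hab.2)

-- ===== VERDICT (by name: the statement is the Claim_ definition above) =====
theorem fill_missing_images_spec : Claim_equal_fill_missing_images := by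
  intro frame_mapping start end_ _hdom hpre
  unfold Spec_fill_missing_images fill_missing_images
  set d := PySem.Dict.ofList frame_mapping with hd
  set ks := PySem.List.sorted d.keys (fun x => x) false with hks
  have hport : fill_missing_images_alt frame_mapping start end_
      = pvFinish d ks end_ ((ks.zip ks.tail).foldl (pvStep d end_) (start, [])) := rfl
  rw [hport]
  by_cases hr : end_ + 1 ≤ start
  · rw [pv_range_nil start (end_ + 1) hr,
      pv_foldB_empty d end_ (ks.zip ks.tail) start [] (by omega)]
    unfold pvFinish
    rw [if_neg (by omega)]
    rfl
  · have hfm : frame_mapping ≠ [] := by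
      rcases hpre with h | h
      · exact h
      · omega
    have hnd : d.keys.Nodup := PySem.Dict.nodup_keys_ofList frame_mapping
    have hs : ks.Pairwise (· < ·) := pv_sorted_keys_lt d hnd
    have hne : ks ≠ [] := by
      intro hnil
      have hkeys : d.keys = [] := by
        have hperm : List.Perm ks d.keys := PySem.List.sorted_perm d.keys (fun x => x) false
        rw [hnil] at hperm
        exact (List.Perm.nil_eq hperm).symm
      rcases frame_mapping with _ | ⟨⟨k, v⟩, rest⟩
      · exact hfm rfl
      · have hcont : d.contains k = true := by
          rw [hd, PySem.Dict.contains_iff_mem_keys]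
          show k ∈ (PySem.Dict.empty.update ((k, v) :: rest)).keys
          rw [PySem.Dict.update, PySem.Dict.keys_foldl_insert_key]
          rw [PySem.Set.mem_update]
          right
          simp
        have := (PySem.Dict.contains_iff_mem_keys d k).mp hcont
        rw [hkeys] at this
        exact absurd this (List.not_mem_nil)
    rw [pv_foldA d ks hks hne hs (end_ + 1) ((end_ + 1) - start).toNat start [] rfl]
    have hB := pv_foldB d ks end_ ks start [] hne hs rfl
      (by
        intro i _ _
        unfold pvVal
        rw [pvNearest_eq ks i hs hne])
    simpa using hB.symm
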